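-- pv_equiv track=rewrite | github.com/tomatija/Vaja10 | Covid-19.py | okuzeni
-- ===== SOURCE A (Python) =====
-- def okuzeni(skupine, nosilci):
--     rez = []
--     for okuzen in nosilci:
--         for ljudi in skupine:
--             if okuzen in ljudi:
--                 for x in ljudi:
--                     if x not in rez and x not in nosilci:
--                       rez.append(x)
--     return set(rez)
-- ===== SOURCE B (Python) =====
-- def okuzeni(skupine, nosilci):
--     # Inverted index: person -> groups containing them (built once), then a
--     # direct lookup per carrier with a seen-set for the exclusion tests.
--     index = {}
--     for g in skupine:
--         for p in dict.fromkeys(g):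
--             index.setdefault(p, []).append(g)
--     seen = set(nosilci)
--     rez = []
--     for okuzen in nosilci:
--         for g in index.get(okuzen, []):
--             for x in g:
--                 if x not in seen:
--                     seen.add(x)
--                     rez.append(x)
--     return set(rez)
-- ===== Notes on version B (the rewrite author's own statement) =====
-- stated objective: alternative
-- what changed: B builds an inverted index (person -> list of groups) in one pass and keeps a seen-set, so each carrier directly looks up its groups and membership tests replace linear scans of rez and nosilci, instead of A's per-carrier rescan of every group.
import Mathlib
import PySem

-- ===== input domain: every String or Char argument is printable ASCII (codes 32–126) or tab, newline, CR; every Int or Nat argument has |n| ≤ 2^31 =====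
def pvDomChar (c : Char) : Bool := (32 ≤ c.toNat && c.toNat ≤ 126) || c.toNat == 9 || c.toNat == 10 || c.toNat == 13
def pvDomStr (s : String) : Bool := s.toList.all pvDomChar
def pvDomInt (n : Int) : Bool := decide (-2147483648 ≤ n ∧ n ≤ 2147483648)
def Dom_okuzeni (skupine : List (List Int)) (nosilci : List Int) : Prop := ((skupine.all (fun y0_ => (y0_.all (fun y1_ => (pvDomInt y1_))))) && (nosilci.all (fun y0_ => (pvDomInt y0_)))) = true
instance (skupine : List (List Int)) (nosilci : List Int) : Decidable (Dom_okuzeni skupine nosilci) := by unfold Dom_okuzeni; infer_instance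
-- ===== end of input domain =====

-- B builds an inverted index (person -> groups) once plus a seen-set, replacing A's
-- per-carrier rescan of all groups and linear scans of rez/nosilci (objective: alternative).

-- ===== PORT A =====
def okuzeni (skupine : List (List Int)) (nosilci : List Int) : List Int :=
  let rez := nosilci.foldl (fun rez okuzen =>
    skupine.foldl (fun rez ljudi =>
      if okuzen ∈ ljudi then
        ljudi.foldl (fun rez x =>
          if x ∉ rez ∧ x ∉ nosilci then rez ++ [x] else rez) rez
      else rez) rez) []
  PySem.Set.ofList rez

-- ===== PORT B =====
def okuzeni_alt (skupine : List (List Int)) (nosilci : List Int) : List Int :=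
  -- index = {}; for g in skupine: for p in dict.fromkeys(g): index.setdefault(p, []).append(g)
  let index : PySem.Dict Int (List (List Int)) :=
    skupine.foldl (fun idx g =>
      (PySem.List.dedup g).foldl (fun idx p => idx.insert p (idx.getD p [] ++ [g])) idx)
      PySem.Dict.empty
  -- seen = set(nosilci); rez = []; the nested lookup loops
  let st := nosilci.foldl (fun (st : List Int × PySem.Set Int) okuzen =>
    (index.getD okuzen []).foldl (fun st g =>
      g.foldl (fun (st : List Int × PySem.Set Int) x =>
        if x ∈ st.2 then st else (st.1 ++ [x], PySem.Set.add st.2 x)) st) st)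
    ([], PySem.Set.ofList nosilci)
  PySem.Set.ofList st.1

-- ===== PRECONDITION & SPEC =====
def Spec_okuzeni (skupine : List (List Int)) (nosilci : List Int) (out : List Int) : Prop := out = okuzeni_alt skupine nosilci
instance (skupine : List (List Int)) (nosilci : List Int) (out : List Int) : Decidable (Spec_okuzeni skupine nosilci out) := by unfold Spec_okuzeni; infer_instance

-- ===== CLAIM (what is proved, stated in full; the proofs are below) =====
def Claim_equal_okuzeni : Prop := ∀ (skupine : List (List Int)) (nosilci : List Int), Dom_okuzeni skupine nosilci → Spec_okuzeni skupine nosilci (okuzeni skupine nosilci)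

-- ===== LEMMAS AND PROOFS =====

-- A's step on the result list, and B's step on (result, seen)
def pvAStep (nosilci : List Int) (rez : List Int) (x : Int) : List Int :=
  if x ∉ rez ∧ x ∉ nosilci then rez ++ [x] else rez
def pvBStep (st : List Int × PySem.Set Int) (x : Int) : List Int × PySem.Set Int :=
  if x ∈ st.2 then st else (st.1 ++ [x], PySem.Set.add st.2 x)

def pvInv (nosilci rez : List Int) (seen : PySem.Set Int) : Prop :=
  ∀ x : Int, x ∈ seen ↔ x ∈ nosilci ∨ x ∈ rez

-- The index's value at p is exactly the groups containing p, in order.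
lemma pv_index_inner (g : List Int) (d : List Int) (hnd : d.Nodup)
    (idx : PySem.Dict Int (List (List Int))) (p : Int) :
    (d.foldl (fun idx q => idx.insert q (idx.getD q [] ++ [g])) idx).getD p []
      = idx.getD p [] ++ (if p ∈ d then [g] else []) := by
  induction d generalizing idx with
  | nil => simp
  | cons q d' ih =>
    simp only [List.foldl_cons]
    rcases List.nodup_cons.mp hnd with ⟨hq, hnd'⟩
    rw [ih hnd']
    by_cases hpq : p = q
    · subst hpq
      rw [PySem.Dict.getD_insert_self]
      simp [hq]
    · rw [PySem.Dict.getD_insert]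
      simp [List.mem_cons, hpq]

lemma pv_index_getD (skupine : List (List Int))
    (idx : PySem.Dict Int (List (List Int))) (p : Int) :
    (skupine.foldl (fun idx g =>
        (PySem.List.dedup g).foldl (fun idx q => idx.insert q (idx.getD q [] ++ [g])) idx)
        idx).getD p []
      = idx.getD p [] ++ skupine.filter (fun g => decide (p ∈ g)) := by
  induction skupine generalizing idx with
  | nil => simp
  | cons g gs ih =>
    simp only [List.foldl_cons, List.filter_cons]
    rw [ih, pv_index_inner g (PySem.List.dedup g) (PySem.List.nodup_dedup g)]
    by_cases hp : p ∈ g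
    · simp [hp, List.append_assoc]
    · simp [hp]

-- folding over the filtered list = guarded folding over the whole list
lemma pv_foldl_filter {α : Type} (gs : List (List Int)) (p : Int)
    (f : α → List Int → α) (a : α) :
    (gs.filter (fun g => decide (p ∈ g))).foldl f a
      = gs.foldl (fun a g => if p ∈ g then f a g else a) a := by
  induction gs generalizing a with
  | nil => rfl
  | cons g gs ih =>
    by_cases hp : p ∈ g <;> simp [hp, ih]

-- innermost simulation: one group
lemma pv_sim_inner (nosilci g rez : List Int) (seen : PySem.Set Int)
    (h : pvInv nosilci rez seen) :
    (g.foldl pvBStep (rez, seen)).1 = g.foldl (pvAStep nosilci) rez ∧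
    pvInv nosilci (g.foldl pvBStep (rez, seen)).1 (g.foldl pvBStep (rez, seen)).2 := by
  induction g generalizing rez seen with
  | nil => exact ⟨rfl, h⟩
  | cons x g ih =>
    simp only [List.foldl_cons]
    by_cases hx : x ∈ seen
    · have hA : pvAStep nosilci rez x = rez := by
        unfold pvAStep
        have := (h x).mp hx
        split_ifs with hc
        · rcases this with h1 | h1
          · exact absurd h1 hc.2
          · exact absurd h1 hc.1
        · rfl
      rw [show pvBStep (rez, seen) x = (rez, seen) by unfold pvBStep; simp [hx], hA]
      exact ih rez seen h
    · have hA : pvAStep nosilci rez x = rez ++ [x] := by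
        unfold pvAStep
        have hx1 : x ∉ nosilci ∧ x ∉ rez := by
          constructor <;> intro hm
          · exact hx ((h x).mpr (Or.inl hm))
          · exact hx ((h x).mpr (Or.inr hm))
        simp [hx1.1, hx1.2]
      rw [show pvBStep (rez, seen) x = (rez ++ [x], PySem.Set.add seen x) by
            unfold pvBStep; simp [hx], hA]
      apply ih
      intro y
      rw [PySem.Set.mem_add]
      constructor
      · rintro (hy | rfl)
        · rcases (h y).mp hy with h1 | h1
          · exact Or.inl h1
          · exact Or.inr (List.mem_append_left _ h1)
        · exact Or.inr (List.mem_append_right _ (List.mem_singleton.mpr rfl))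
      · rintro (hy | hy)
        · exact Or.inl ((h y).mpr (Or.inl hy))
        · rcases List.mem_append.mp hy with h1 | h1
          · exact Or.inl ((h y).mpr (Or.inr h1))
          · exact Or.inr (List.mem_singleton.mp h1)

-- middle simulation: all groups (guarded on membership of the carrier)
lemma pv_sim_mid (nosilci : List Int) (gs : List (List Int)) (okuzen : Int)
    (rez : List Int) (seen : PySem.Set Int) (h : pvInv nosilci rez seen) :
    (gs.foldl (fun st g => if okuzen ∈ g then g.foldl pvBStep st else st) (rez, seen)).1
      = gs.foldl (fun rez g => if okuzen ∈ g then g.foldl (pvAStep nosilci) rez else rez) rez ∧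
    pvInv nosilci
      (gs.foldl (fun st g => if okuzen ∈ g then g.foldl pvBStep st else st) (rez, seen)).1
      (gs.foldl (fun st g => if okuzen ∈ g then g.foldl pvBStep st else st) (rez, seen)).2 := by
  induction gs generalizing rez seen with
  | nil => exact ⟨rfl, h⟩
  | cons g gs ih =>
    simp only [List.foldl_cons]
    by_cases hg : okuzen ∈ g
    · simp only [if_pos hg]
      obtain ⟨h1, h2⟩ := pv_sim_inner nosilci g rez seen h
      obtain ⟨ha, hb⟩ := ih (g.foldl pvBStep (rez, seen)).1 (g.foldl pvBStep (rez, seen)).2 h2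
      refine ⟨?_, ?_⟩
      · rw [ha, h1]
      · exact hb
    · simp only [if_neg hg]
      exact ih rez seen h

-- outer simulation: all carriers
lemma pv_sim_outer (nosilci ms : List Int) (skupine : List (List Int))
    (rez : List Int) (seen : PySem.Set Int) (h : pvInv nosilci rez seen) :
    (ms.foldl (fun st okuzen =>
        skupine.foldl (fun st g => if okuzen ∈ g then g.foldl pvBStep st else st) st)
        (rez, seen)).1
      = ms.foldl (fun rez okuzen =>
          skupine.foldl (fun rez g => if okuzen ∈ g then g.foldl (pvAStep nosilci) rez else rez) rez)
          rez := by
  induction ms generalizing rez seen with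
  | nil => rfl
  | cons m ms ih =>
    simp only [List.foldl_cons]
    obtain ⟨h1, h2⟩ := pv_sim_mid nosilci skupine m rez seen h
    rw [← Prod.mk.eta (p := skupine.foldl _ (rez, seen))] at *
    rw [ih _ _ h2, h1]

-- ===== VERDICT (by name: the statement is the Claim_ definition above) =====
theorem okuzeni_spec : Claim_equal_okuzeni := by
  intro skupine nosilci _
  unfold Spec_okuzeni okuzeni okuzeni_alt
  simp only
  congr 1
  have hidx : ∀ okuzen : Int,
      ((skupine.foldl (fun idx g =>
          (PySem.List.dedup g).foldl (fun idx p => idx.insert p (idx.getD p [] ++ [g])) idx)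
          PySem.Dict.empty).getD okuzen [])
        = skupine.filter (fun g => decide (okuzen ∈ g)) := by
    intro okuzen
    rw [pv_index_getD]
    simp
  have hB : (nosilci.foldl (fun (st : List Int × PySem.Set Int) okuzen =>
        ((skupine.foldl (fun idx g =>
            (PySem.List.dedup g).foldl (fun idx p => idx.insert p (idx.getD p [] ++ [g])) idx)
            PySem.Dict.empty).getD okuzen []).foldl (fun st g => g.foldl pvBStep st) st)
        ([], PySem.Set.ofList nosilci))
      = (nosilci.foldl (fun (st : List Int × PySem.Set Int) okuzen =>
          skupine.foldl (fun st g => if okuzen ∈ g then g.foldl pvBStep st else st) st)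
          ([], PySem.Set.ofList nosilci)) := by
    apply PySem.List.foldl_congr_mem
    intro st okuzen _
    rw [hidx okuzen, pv_foldl_filter]
  have hinv : pvInv nosilci [] (PySem.Set.ofList nosilci) := by
    intro x
    simp [PySem.Set.mem_ofList]
  have := pv_sim_outer nosilci nosilci skupine [] (PySem.Set.ofList nosilci) hinv
  show (nosilci.foldl (fun rez okuzen =>
      skupine.foldl (fun rez ljudi =>
        if okuzen ∈ ljudi then ljudi.foldl (pvAStep nosilci) rez else rez) rez) [])
    = (nosilci.foldl (fun (st : List Int × PySem.Set Int) okuzen =>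
        ((skupine.foldl (fun idx g =>
            (PySem.List.dedup g).foldl (fun idx p => idx.insert p (idx.getD p [] ++ [g])) idx)
            PySem.Dict.empty).getD okuzen []).foldl (fun st g => g.foldl pvBStep st) st)
        ([], PySem.Set.ofList nosilci)).1
  rw [hB]
  exact this.symm
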